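-- pv_equiv track=rewrite | github.com/paineliu/bcc_nlq | make_query.py | get_sample_pos
-- ===== SOURCE A (Python) =====
-- def cut_sample(bcc_list, a, b):
--     ret_list = []
--     for tokens in bcc_list:
--         if a == b:
--             ret_list.append('+'.join(tokens[max(a - 1, 0): min(a + 2, len(tokens))]))
--         else:
--             ret_list.append('+'.join(tokens[a: b + 1]))
--     return ret_list
--
-- def get_sample_pos(tokens, a, b):
--     bcc_list = []
--     bcc = []
--     for i, item in enumerate(tokens):
--         if (i == a):
--             bcc.append('{}'.format(item[1]))
--         elif (i == b):
--             bcc.append('{}'.format(item[1]))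
--         else:
--             bcc.append(item[0])
--     bcc_list.append(bcc)
--     return cut_sample(bcc_list, a, b)
-- ===== SOURCE B (Python) =====
-- def get_sample_pos(tokens, a, b):
--     # Select the window of indices first (via list-slice semantics), then
--     # transform only those positions, instead of transforming every token
--     # and slicing afterwards.
--     n = len(tokens)
--     idxs = list(range(n))
--     win = idxs[max(a - 1, 0): min(a + 2, n)] if a == b else idxs[a: b + 1]
--     return ['+'.join(tokens[i][1] if (i == a or i == b) else tokens[i][0]
--                      for i in win)]
-- ===== Notes on version B (the rewrite author's own statement) =====
-- stated objective: simpler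
-- what changed: Inlines cut_sample and reverses the traversal order: selects the slice window of indices first and transforms only those positions, instead of transforming all tokens and then slicing.
import Mathlib
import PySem

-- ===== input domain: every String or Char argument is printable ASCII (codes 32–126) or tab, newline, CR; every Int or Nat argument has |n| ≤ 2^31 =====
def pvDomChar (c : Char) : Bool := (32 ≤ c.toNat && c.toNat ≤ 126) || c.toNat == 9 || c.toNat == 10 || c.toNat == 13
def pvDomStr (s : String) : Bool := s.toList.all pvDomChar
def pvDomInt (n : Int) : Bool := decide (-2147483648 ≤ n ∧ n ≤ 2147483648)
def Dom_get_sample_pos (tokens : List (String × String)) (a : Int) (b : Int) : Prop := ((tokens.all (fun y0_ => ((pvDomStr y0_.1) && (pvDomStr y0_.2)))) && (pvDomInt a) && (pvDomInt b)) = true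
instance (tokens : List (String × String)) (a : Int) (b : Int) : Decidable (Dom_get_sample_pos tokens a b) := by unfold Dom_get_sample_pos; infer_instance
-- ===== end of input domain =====

-- B inlines cut_sample and reverses the traversal: it slices the index window first
-- and transforms only those positions, instead of transforming every token then slicing.

-- ===== PORT A =====
def cut_sample (bcc_list : List (List String)) (a : Int) (b : Int) : List String :=
  bcc_list.foldl (fun ret_list tokens =>
    if a = b then
      ret_list ++ [PySem.Str.join "+"
        (PySem.List.slice tokens (some (max (a - 1) 0)) (some (min (a + 2) (tokens.length : Int))))]
    else
      ret_list ++ [PySem.Str.join "+" (PySem.List.slice tokens (some a) (some (b + 1)))]) []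

def get_sample_pos (tokens : List (String × String)) (a : Int) (b : Int) : List String :=
  -- for i, item in enumerate(tokens): append chosen field ('{}'.format(s) = s for strings)
  let bcc := (PySem.List.enumerate tokens 0).foldl (fun bcc p =>
    if p.1 = a then bcc ++ [p.2.2]
    else if p.1 = b then bcc ++ [p.2.2]
    else bcc ++ [p.2.1]) []
  cut_sample [bcc] a b

-- ===== PORT B =====
def get_sample_pos_alt (tokens : List (String × String)) (a : Int) (b : Int) : List String :=
  let n : Int := tokens.length
  let idxs := PySem.List.pyRange 0 n 1
  let win := if a = b then
      PySem.List.slice idxs (some (max (a - 1) 0)) (some (min (a + 2) n))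
    else
      PySem.List.slice idxs (some a) (some (b + 1))
  -- tokens[i]: i comes from a slice of range(n), so it is always in range;
  -- pyGet? is exact there and the .getD default is never used.
  [PySem.Str.join "+" (win.map (fun i =>
    if i = a ∨ i = b then ((PySem.List.pyGet? tokens i).getD ("", "")).2
    else ((PySem.List.pyGet? tokens i).getD ("", "")).1))]

-- ===== PRECONDITION & SPEC =====
def Spec_get_sample_pos (tokens : List (String × String)) (a : Int) (b : Int) (out : List String) : Prop := out = get_sample_pos_alt tokens a b
instance (tokens : List (String × String)) (a : Int) (b : Int) (out : List String) : Decidable (Spec_get_sample_pos tokens a b out) := by unfold Spec_get_sample_pos; infer_instance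

-- ===== CLAIM (what is proved, stated in full; the proofs are below) =====
def Claim_equal_get_sample_pos : Prop := ∀ (tokens : List (String × String)) (a : Int) (b : Int), Dom_get_sample_pos tokens a b → Spec_get_sample_pos tokens a b (get_sample_pos tokens a b)

-- ===== LEMMAS AND PROOFS =====

-- the append-accumulating loop is a map
theorem foldl_append_of {α β : Type} (step : List β → α → List β) (f : α → β)
    (h : ∀ acc x, step acc x = acc ++ [f x]) (l : List α) (init : List β) :
    l.foldl step init = init ++ l.map f := by
  induction l generalizing init with
  | nil => simp
  | cons x xs ih => simp [List.foldl_cons, h, ih]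

-- slice commutes with map (slice is clamped drop/take and clampIdx only uses the length)
theorem slice_map {α β : Type} (f : α → β) (xs : List α) (a b : Int) :
    PySem.List.slice (xs.map f) (some a) (some b)
      = (PySem.List.slice xs (some a) (some b)).map f := by
  simp [PySem.List.slice, List.map_drop, List.map_take]

theorem elem_eq (tokens : List (String × String)) (a b : Int) :
    ∀ i ∈ PySem.List.pyRange 0 (tokens.length : Int) 1,
      (fun j => if j = a then (PySem.List.pyGetD tokens j ("", "")).2
                else if j = b then (PySem.List.pyGetD tokens j ("", "")).2
                else (PySem.List.pyGetD tokens j ("", "")).1) i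
        = (fun j => if j = a ∨ j = b then ((PySem.List.pyGet? tokens j).getD ("", "")).2
                    else ((PySem.List.pyGet? tokens j).getD ("", "")).1) i := by
  intro i hi
  rw [PySem.List.mem_pyRange_one] at hi
  obtain ⟨h0, h1⟩ := hi
  have hget : PySem.List.pyGet? tokens i = some (PySem.List.pyGetD tokens i ("", "")) := by
    simp [PySem.List.pyGet?, PySem.List.pyGetD, PySem.List.pyIdx?, h0, h1]
  simp only [hget, Option.getD_some]
  by_cases h1 : i = a <;> by_cases h2 : i = b <;> simp [h1, h2]

theorem get_sample_pos_eq (tokens : List (String × String)) (a b : Int) :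
    get_sample_pos tokens a b = get_sample_pos_alt tokens a b := by
  simp only [get_sample_pos, get_sample_pos_alt, cut_sample]
  rw [foldl_append_of _ (fun p : Int × (String × String) =>
        if p.1 = a then p.2.2 else if p.1 = b then p.2.2 else p.2.1)
      (by intro acc p; by_cases h1 : p.1 = a <;> by_cases h2 : p.1 = b <;> simp [h1, h2]),
    PySem.List.enumerate_eq_map_pyRange (d := ("", ""))]
  simp only [List.nil_append, List.foldl_cons, List.foldl_nil, List.map_map,
    PySem.List.len_eq, List.length_map, PySem.List.length_pyRange_one, sub_zero,
    Int.toNat_natCast]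
  by_cases hab : a = b
  · simp only [if_pos hab]
    rw [slice_map]
    refine congrArg (fun l => [PySem.Str.join "+" l]) (List.map_congr_left ?_)
    intro i hi
    simpa using elem_eq tokens a b i (PySem.List.mem_of_mem_slice _ _ _ hi)
  · simp only [if_neg hab]
    rw [slice_map]
    refine congrArg (fun l => [PySem.Str.join "+" l]) (List.map_congr_left ?_)
    intro i hi
    simpa using elem_eq tokens a b i (PySem.List.mem_of_mem_slice _ _ _ hi)

-- ===== VERDICT (by name: the statement is the Claim_ definition above) =====
theorem get_sample_pos_spec : Claim_equal_get_sample_pos := by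
  intro tokens a b _
  exact get_sample_pos_eq tokens a b
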